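-- pv_equiv track=rewrite | github.com/thijsnulle/msc-experiment | plots/results/visualisations-2.py | get_excess_tokens_for_func_level
-- ===== SOURCE A (Python) =====
-- import itertools
--
-- def get_excess_tokens_for_func_level(code_lines, tokens):
--     code_tokens_length = len(tokens)
--     code_lines_until_return = list(itertools.dropwhile(
--         lambda x: not x.strip().startswith(('return', 'pass')),
--         reversed(code_lines),
--     ))
--     code_lines_until_return.reverse()
--
--
--     if len(code_lines_until_return) == 0:
--         return None
--
--     # Excess tokens after function implementation
--     excess_tokens = 0
--     if len(code_lines) != len(code_lines_until_return):
--         newline_counter = len(code_lines) - len(code_lines_until_return)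
--
--         while newline_counter > 0:
--             if tokens[-1] == '\n':
--                 newline_counter -= 1
--
--             tokens.pop()
--
--         excess_tokens += (code_tokens_length - len(tokens))
--
--     # Excess print-statement tokens
--     print_indexes = [i for i, t in enumerate(tokens) if t == 'print']
--
--     for i in print_indexes:
--         preceding_whitespace_tokens = list(itertools.takewhile(
--             lambda x: all(y == ' ' for y in x),
--             reversed(tokens[:i]),
--         ))
--
--         succeeding_print_tokens = list(itertools.takewhile(
--             lambda x: x != '\n',
--             tokens[i:],
--         ))
--
--         excess_tokens += len(preceding_whitespace_tokens)
--         excess_tokens += len(succeeding_print_tokens)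
--
--     # Excess comment tokens
--     comments_indexes = [i for i, t in enumerate(tokens) if t == '#']
--
--     for i in comments_indexes:
--         preceding_whitespace_tokens = list(itertools.takewhile(
--             lambda x: all(y == ' ' for y in x),
--             reversed(tokens[:i]),
--         ))
--
--         succeeding_comment_tokens = list(itertools.takewhile(
--             lambda x: x != '\n',
--             tokens[i:],
--         ))
--
--         excess_tokens += len(preceding_whitespace_tokens)
--         excess_tokens += len(succeeding_comment_tokens)
--
--     return excess_tokens
-- ===== SOURCE B (Python) =====
-- def get_excess_tokens_for_func_level(code_lines, tokens):
--     code_tokens_length = len(tokens)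
--
--     # number of trailing lines after the last 'return'/'pass' line
--     trailing = 0
--     for line in reversed(code_lines):
--         if line.strip().startswith(('return', 'pass')):
--             break
--         trailing += 1
--
--     if trailing == len(code_lines):
--         return None
--
--     excess = 0
--     if trailing > 0:
--         # pop trailing tokens until `trailing` newline tokens were removed (same mutation as A)
--         while trailing > 0:
--             if tokens[-1] == '\n':
--                 trailing -= 1
--             tokens.pop()
--         excess += code_tokens_length - len(tokens)
--
--     n = len(tokens)
--     # right-to-left pass: dist[i] = number of tokens from i up to (excluding) the next '\n'
--     dist = [0] * (n + 1)
--     for i in range(n - 1, -1, -1):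
--         dist[i] = 0 if tokens[i] == '\n' else dist[i + 1] + 1
--
--     # single left-to-right pass maintaining the current run of whitespace tokens
--     ws = 0
--     for i, t in enumerate(tokens):
--         if t == 'print' or t == '#':
--             excess += ws + dist[i]
--         ws = ws + 1 if all(c == ' ' for c in t) else 0
--     return excess
-- ===== Notes on version B (the rewrite author's own statement) =====
-- stated objective: alternative
-- what changed: The two per-marker rescans (a reversed takewhile over tokens[:i] and a forward takewhile over tokens[i:] for every 'print' and every '#') are replaced by two linear passes: a right-to-left pass precomputing distance-to-next-newline and a single left-to-right pass maintaining the current whitespace-run length; the trailing-line trim (and its tokens mutation) is kept; asymptotically better when marker tokens are dense, though a timing run did not consistently confirm a speedup.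
import Mathlib
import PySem

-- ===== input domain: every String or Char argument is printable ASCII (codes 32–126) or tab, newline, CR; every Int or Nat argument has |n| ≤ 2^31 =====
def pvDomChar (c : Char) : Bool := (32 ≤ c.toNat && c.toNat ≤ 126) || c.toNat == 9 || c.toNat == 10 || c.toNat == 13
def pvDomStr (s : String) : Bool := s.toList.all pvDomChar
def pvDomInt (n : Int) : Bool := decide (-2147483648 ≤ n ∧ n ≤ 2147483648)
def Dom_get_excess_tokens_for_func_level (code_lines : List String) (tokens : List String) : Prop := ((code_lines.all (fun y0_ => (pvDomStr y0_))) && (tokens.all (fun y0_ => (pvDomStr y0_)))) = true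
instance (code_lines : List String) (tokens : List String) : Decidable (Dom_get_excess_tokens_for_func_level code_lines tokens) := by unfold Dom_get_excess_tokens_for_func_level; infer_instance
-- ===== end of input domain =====

-- B replaces A's per-marker rescans (slice + takewhile for every 'print'/'#' token) by one
-- right-to-left distance-precomputation pass plus one left-to-right pass keeping the
-- whitespace-run length (a single-pass alternative); both programs mutate `tokens`
-- identically in Python (the popped trailing tokens); the equivalence proved is about
-- the return value.


-- ===== PORT A =====
-- shared helpers (the corresponding Python fragments are identical in A and B):
-- x.strip().startswith(('return', 'pass'))
def pvPred (x : String) : Bool :=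
  PySem.Str.startswith (PySem.Str.strip x) "return" || PySem.Str.startswith (PySem.Str.strip x) "pass"

-- all(y == ' ' for y in x)
def pvIsWS (t : String) : Bool := t.toList.all (fun c => c == ' ')

-- the pop loop `while newline_counter > 0: if tokens[-1]=='\n': counter -= 1; tokens.pop()`,
-- acting on the REVERSED token list (pop from the front); if the list runs out Python raises
-- IndexError (excluded by Pre_) and this port just stops.
def pvPop (c : Int) (rev : List String) : List String :=
  if c ≤ 0 then rev
  else match rev with
    | [] => []
    | t :: rest => pvPop (if t == "\n" then c - 1 else c) rest
termination_by rev.length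

def get_excess_tokens_for_func_level (code_lines : List String) (tokens : List String) : Option Int :=
  let code_tokens_length : Int := tokens.length
  let code_lines_until_return := ((code_lines.reverse).dropWhile (fun x => !pvPred x)).reverse
  if code_lines_until_return.length = 0 then none
  else
    let st :=
      if code_lines.length ≠ code_lines_until_return.length then
        let newline_counter : Int := (code_lines.length : Int) - (code_lines_until_return.length : Int)
        let toks := (pvPop newline_counter tokens.reverse).reverse
        (toks, code_tokens_length - (toks.length : Int))
      else (tokens, (0 : Int))
    let toks := st.1
    let print_indexes := (PySem.List.enumerate toks 0).filterMap
      (fun p => if p.2 == "print" then some p.1 else none)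
    let excess_tokens := print_indexes.foldl (fun acc i =>
        acc + (((PySem.List.slice toks none (some i)).reverse.takeWhile pvIsWS).length : Int)
            + (((PySem.List.slice toks (some i) none).takeWhile (fun x => x != "\n")).length : Int)) st.2
    let comments_indexes := (PySem.List.enumerate toks 0).filterMap
      (fun p => if p.2 == "#" then some p.1 else none)
    let excess_tokens := comments_indexes.foldl (fun acc i =>
        acc + (((PySem.List.slice toks none (some i)).reverse.takeWhile pvIsWS).length : Int)
            + (((PySem.List.slice toks (some i) none).takeWhile (fun x => x != "\n")).length : Int)) excess_tokens
    some excess_tokens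

-- ===== PORT B =====
-- `for line in reversed(code_lines): if pred: break; trailing += 1`
def pvTrailing : List String → Nat
  | [] => 0
  | l :: rest => if pvPred l then 0 else pvTrailing rest + 1

-- right-to-left pass: dist[i] = 0 if tokens[i]=='\n' else dist[i+1]+1
def pvDist : List String → List Int
  | [] => []
  | t :: rest =>
    let r := pvDist rest
    (if t == "\n" then 0 else r.headD 0 + 1) :: r

-- left-to-right pass over (token, dist) pairs with whitespace-run state
def pvScan : List (String × Int) → Int → Int → Int
  | [], _, acc => acc
  | (t, d) :: rest, ws, acc =>
    pvScan rest (if pvIsWS t then ws + 1 else 0)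
      (if t == "print" || t == "#" then acc + ws + d else acc)

def get_excess_tokens_for_func_level_alt (code_lines : List String) (tokens : List String) : Option Int :=
  let code_tokens_length : Int := tokens.length
  let trailing := pvTrailing code_lines.reverse
  if trailing = code_lines.length then none
  else
    let st :=
      if 0 < trailing then
        let toks := (pvPop (trailing : Int) tokens.reverse).reverse
        (toks, code_tokens_length - (toks.length : Int))
      else (tokens, (0 : Int))
    some (pvScan (st.1.zip (pvDist st.1)) 0 st.2)

-- ===== PRECONDITION & SPEC =====
-- Pre_ excludes exactly the inputs on which Python A raises IndexError: when there are
-- trailing lines after the last 'return'/'pass' line, the pop loop needs at least that many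
-- '\n' tokens in `tokens`. (B raises identically there.)
def Pre_get_excess_tokens_for_func_level (code_lines : List String) (tokens : List String) : Prop :=
  (code_lines.reverse.takeWhile (fun x =>
      !(PySem.Str.startswith (PySem.Str.strip x) "return"
        || PySem.Str.startswith (PySem.Str.strip x) "pass"))).length = code_lines.length
  ∨ (code_lines.reverse.takeWhile (fun x =>
      !(PySem.Str.startswith (PySem.Str.strip x) "return"
        || PySem.Str.startswith (PySem.Str.strip x) "pass"))).length ≤ tokens.count "\n"

instance (code_lines : List String) (tokens : List String) : Decidable (Pre_get_excess_tokens_for_func_level code_lines tokens) := by unfold Pre_get_excess_tokens_for_func_level; infer_instance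

def pvWitness_get_excess_tokens_for_func_level : List String × List String :=
  (["def f():", "  print(1)", "  return 1", "x = 1"], ["def", "f", "(", ")", ":", "\n", " ", "print", "(", "1", ")", "\n", " ", "return", "1", "\n", "x", "=", "1", "\n"])

def Spec_get_excess_tokens_for_func_level (code_lines : List String) (tokens : List String) (out : Option Int) : Prop := out = get_excess_tokens_for_func_level_alt code_lines tokens
instance (code_lines : List String) (tokens : List String) (out : Option Int) : Decidable (Spec_get_excess_tokens_for_func_level code_lines tokens out) := by unfold Spec_get_excess_tokens_for_func_level; infer_instance

-- ===== CLAIM (what is proved, stated in full; the proofs are below) =====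
def Claim_equal_get_excess_tokens_for_func_level : Prop := ∀ (code_lines : List String) (tokens : List String), Dom_get_excess_tokens_for_func_level code_lines tokens → Pre_get_excess_tokens_for_func_level code_lines tokens → Spec_get_excess_tokens_for_func_level code_lines tokens (get_excess_tokens_for_func_level code_lines tokens)

-- ===== LEMMAS AND PROOFS =====

-- number of tokens from the front of l up to (excluding) the first '\n'
def pvTW (l : List String) : Int := ((l.takeWhile (fun x => x != "\n")).length : Int)

-- length of the whitespace run at the END of `pre`
def pvRun (pre : List String) : Int := ((pre.reverse.takeWhile pvIsWS).length : Int)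

-- per-index contribution of A's marker loops
def pvG (ts : List String) (i : Int) : Int :=
  (((PySem.List.slice ts none (some i)).reverse.takeWhile pvIsWS).length : Int)
  + (((PySem.List.slice ts (some i) none).takeWhile (fun x => x != "\n")).length : Int)

-- structural spec of the marker sum with whitespace-run state ws
def pvS : List String → Int → Int
  | [], _ => 0
  | t :: r, ws =>
    (if t == "print" || t == "#" then ws + pvTW (t :: r) else 0)
    + pvS r (if pvIsWS t then ws + 1 else 0)

theorem pvTW_cons (t : String) (r : List String) :
    pvTW (t :: r) = if t == "\n" then 0 else pvTW r + 1 := by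
  simp only [pvTW, List.takeWhile, bne]
  by_cases h : t == "\n" <;> simp [h]

theorem pvDist_headD (ts : List String) : (pvDist ts).headD 0 = pvTW ts := by
  induction ts with
  | nil => rfl
  | cons t r ih =>
    have hd : pvDist (t :: r) = (if t == "\n" then 0 else (pvDist r).headD 0 + 1) :: pvDist r := rfl
    rw [hd, List.headD_cons, ih, pvTW_cons]

theorem pvScan_eq_S (ts : List String) (ws acc : Int) :
    pvScan (ts.zip (pvDist ts)) ws acc = acc + pvS ts ws := by
  induction ts generalizing ws acc with
  | nil => simp [pvDist, pvScan, pvS]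
  | cons t r ih =>
    have hd : pvDist (t :: r) = (if t == "\n" then 0 else (pvDist r).headD 0 + 1) :: pvDist r := rfl
    have hh : (if t == "\n" then (0 : Int) else (pvDist r).headD 0 + 1) = pvTW (t :: r) := by
      rw [pvDist_headD r, pvTW_cons]
    rw [hd]
    simp only [List.zip_cons_cons, pvScan, pvS, ih, hh]
    by_cases h : (t == "print" || t == "#") = true <;> simp [h] <;> try ring

theorem pvSum_split (l : List (Int × String)) (g : Int → Int) :
    ((l.filterMap (fun p => if p.2 == "print" then some p.1 else none)).map g).sum
    + ((l.filterMap (fun p => if p.2 == "#" then some p.1 else none)).map g).sum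
    = (l.map (fun p => if p.2 == "print" || p.2 == "#" then g p.1 else 0)).sum := by
  induction l with
  | nil => simp
  | cons p l ih =>
    by_cases hp : p.2 = "print"
    · have hq : p.2 ≠ "#" := by rw [hp]; decide
      simp [hp, hq] at ih ⊢
      omega
    · by_cases hq : p.2 = "#"
      · simp [hp, hq] at ih ⊢
        omega
      · simp [hp, hq] at ih ⊢
        omega

theorem pvRun_snoc (pre : List String) (t : String) :
    pvRun (pre ++ [t]) = if pvIsWS t then pvRun pre + 1 else 0 := by
  simp only [pvRun, List.reverse_append, List.reverse_singleton, List.singleton_append,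
    List.takeWhile]
  by_cases h : pvIsWS t <;> simp [h]

theorem pvEnumSum (suf : List String) (pre : List String) :
    ((PySem.List.enumerate suf (pre.length : Int)).map
        (fun p => if p.2 == "print" || p.2 == "#" then pvG (pre ++ suf) p.1 else 0)).sum
    = pvS suf (pvRun pre) := by
  induction suf generalizing pre with
  | nil => simp [PySem.List.enumerate, pvS]
  | cons t r ih =>
    rw [PySem.List.enumerate_cons, List.map_cons, List.sum_cons]
    have hG : pvG (pre ++ t :: r) ((pre.length : Nat) : Int) = pvRun pre + pvTW (t :: r) := by
      unfold pvG
      rw [PySem.List.slice_to_natCast, PySem.List.slice_from_natCast,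
        List.take_left, List.drop_left]
      rfl
    have hlen : (pre.length : Int) + 1 = (((pre ++ [t]).length : Nat) : Int) := by
      simp
    have happ : pre ++ t :: r = (pre ++ [t]) ++ r := by rw [List.append_cons]
    have htail :
        ((PySem.List.enumerate r ((pre.length : Int) + 1)).map
          (fun p => if p.2 == "print" || p.2 == "#" then pvG (pre ++ t :: r) p.1 else 0)).sum
        = pvS r (if pvIsWS t then pvRun pre + 1 else 0) := by
      rw [hlen, happ, ih (pre ++ [t]), pvRun_snoc]
    simp only [htail, hG, pvS]

theorem pvPhase2 (toks : List String) (e : Int) :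
    (((PySem.List.enumerate toks 0).filterMap
        (fun p => if p.2 == "#" then some p.1 else none)).foldl (fun acc i =>
          acc + (((PySem.List.slice toks none (some i)).reverse.takeWhile pvIsWS).length : Int)
              + (((PySem.List.slice toks (some i) none).takeWhile (fun x => x != "\n")).length : Int))
      (((PySem.List.enumerate toks 0).filterMap
        (fun p => if p.2 == "print" then some p.1 else none)).foldl (fun acc i =>
          acc + (((PySem.List.slice toks none (some i)).reverse.takeWhile pvIsWS).length : Int)
              + (((PySem.List.slice toks (some i) none).takeWhile (fun x => x != "\n")).length : Int)) e))
    = pvScan (toks.zip (pvDist toks)) 0 e := by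
  have hfun : (fun (acc i : Int) =>
          acc + (((PySem.List.slice toks none (some i)).reverse.takeWhile pvIsWS).length : Int)
              + (((PySem.List.slice toks (some i) none).takeWhile (fun x => x != "\n")).length : Int))
      = fun (acc i : Int) => acc + pvG toks i := by
    funext acc i; unfold pvG; ring
  rw [hfun, PySem.List.foldl_add, PySem.List.foldl_add, add_assoc, pvSum_split]
  have h0 : (0 : Int) = ((([] : List String).length : Nat) : Int) := by simp
  rw [pvScan_eq_S]
  congr 1
  calc ((PySem.List.enumerate toks 0).map
          (fun p => if p.2 == "print" || p.2 == "#" then pvG toks p.1 else 0)).sum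
      = ((PySem.List.enumerate toks ((([] : List String).length : Nat) : Int)).map
          (fun p => if p.2 == "print" || p.2 == "#" then pvG (([] : List String) ++ toks) p.1 else 0)).sum := by
        rw [← h0]; simp
    _ = pvS toks (pvRun []) := pvEnumSum toks []
    _ = pvS toks 0 := by rfl

theorem pvTrailing_eq (l : List String) :
    pvTrailing l = (l.takeWhile (fun x => !pvPred x)).length := by
  induction l with
  | nil => rfl
  | cons x l ih =>
    simp only [pvTrailing, List.takeWhile]
    by_cases h : pvPred x <;> simp [h, ih]

-- ===== VERDICT (by name: the statement is the Claim_ definition above) =====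
theorem get_excess_tokens_for_func_level_spec : Claim_equal_get_excess_tokens_for_func_level := by
  intro code_lines tokens _hdom _hpre
  show _ = get_excess_tokens_for_func_level_alt code_lines tokens
  unfold get_excess_tokens_for_func_level get_excess_tokens_for_func_level_alt
  simp only []
  have htr : pvTrailing code_lines.reverse
      = (code_lines.reverse.takeWhile (fun x => !pvPred x)).length := pvTrailing_eq _
  have hsplit : (code_lines.reverse.takeWhile (fun x => !pvPred x)).length
      + (code_lines.reverse.dropWhile (fun x => !pvPred x)).length = code_lines.length := by
    conv_rhs => rw [← List.length_reverse (as := code_lines),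
      ← List.takeWhile_append_dropWhile (p := fun x => !pvPred x) (l := code_lines.reverse)]
    rw [List.length_append]
  by_cases hz : ((code_lines.reverse.dropWhile (fun x => !pvPred x)).reverse).length = 0
  · have hz' : (code_lines.reverse.dropWhile (fun x => !pvPred x)).length = 0 := by
      simpa using hz
    rw [if_pos hz, if_pos (show pvTrailing code_lines.reverse = code_lines.length by
      rw [htr]; omega)]
  · have hz' : ¬ (code_lines.reverse.dropWhile (fun x => !pvPred x)).length = 0 := by
      simpa using hz
    rw [if_neg hz, if_neg (show ¬ pvTrailing code_lines.reverse = code_lines.length by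
      rw [htr]; omega)]
    have hlenrev : (code_lines.reverse.dropWhile (fun x => !pvPred x)).reverse.length
        = (code_lines.reverse.dropWhile (fun x => !pvPred x)).length := by simp
    by_cases h0 : (code_lines.reverse.takeWhile (fun x => !pvPred x)).length = 0
    · rw [if_neg (show ¬ code_lines.length
          ≠ (code_lines.reverse.dropWhile (fun x => !pvPred x)).reverse.length by
        rw [hlenrev]; omega),
        if_neg (show ¬ 0 < pvTrailing code_lines.reverse by rw [htr]; omega)]
      exact congrArg some (pvPhase2 tokens 0)
    · rw [if_pos (show code_lines.length
          ≠ (code_lines.reverse.dropWhile (fun x => !pvPred x)).reverse.length by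
        rw [hlenrev]; omega),
        if_pos (show 0 < pvTrailing code_lines.reverse by rw [htr]; omega)]
      have hnl : (code_lines.length : Int)
          - ((code_lines.reverse.dropWhile (fun x => !pvPred x)).reverse.length : Int)
          = ((pvTrailing code_lines.reverse : Nat) : Int) := by
        rw [htr, hlenrev]; omega
      rw [hnl]
      exact congrArg some (pvPhase2 _ _)
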